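-- pv_equiv track=rewrite | github.com/rouge1/light-cam-canto | experiments/resync_decoder.py | _manchester_decode_tolerant
-- ===== SOURCE A (Python) =====
-- def _manchester_decode_tolerant(symbols, max_errors=4):
--     """Manchester-decode, tolerating up to `max_errors` invalid pairs.
--
--     Returns a list of candidate bit streams, each paired with its error count,
--     sorted by error count (clean first). For invalid pairs, both bit=0 and
--     bit=1 are enumerated. Empty list if too many errors.
--     """
--     if len(symbols) % 2 != 0:
--         return []
--
--     bits = []
--     error_positions = []  # bit-index positions that were invalid
--     for i in range(0, len(symbols), 2):
--         pair = (symbols[i], symbols[i + 1])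
--         if pair == (1, 0):
--             bits.append(0)
--         elif pair == (0, 1):
--             bits.append(1)
--         else:
--             bits.append(0)  # placeholder, will be overridden
--             error_positions.append(len(bits) - 1)
--
--     if len(error_positions) > max_errors:
--         return []
--
--     # Enumerate all 2^N combinations of the unknown bits.
--     candidates = []
--     n_err = len(error_positions)
--     for mask in range(1 << n_err):
--         trial = list(bits)
--         for k, pos in enumerate(error_positions):
--             trial[pos] = (mask >> k) & 1
--         candidates.append((trial, n_err))
--     return candidates
-- ===== SOURCE B (Python) =====
-- def _manchester_decode_tolerant(symbols, max_errors=4):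
--     """Count invalid pairs first, then grow every candidate stream in one
--     incremental build over the pairs, doubling the candidate list at each
--     invalid pair (the new error bit is most significant, so earlier errors
--     vary fastest, matching mask order)."""
--     if len(symbols) % 2 != 0:
--         return []
--     n_err = 0
--     for i in range(0, len(symbols), 2):
--         if (symbols[i], symbols[i + 1]) not in ((1, 0), (0, 1)):
--             n_err += 1
--     if n_err > max_errors:
--         return []
--     candidates = [[]]
--     for i in range(0, len(symbols), 2):
--         pair = (symbols[i], symbols[i + 1])
--         if pair == (1, 0):
--             for c in candidates:
--                 c.append(0)
--         elif pair == (0, 1):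
--             for c in candidates:
--                 c.append(1)
--         else:
--             candidates = [c + [0] for c in candidates] + [c + [1] for c in candidates]
--     return [(c, n_err) for c in candidates]
-- ===== Notes on version B (the rewrite author's own statement) =====
-- stated objective: alternative
-- what changed: B counts invalid pairs in a cheap pass and then grows every candidate stream incrementally in one build over the pairs (doubling the candidate list at each invalid pair), instead of A's collecting bits plus error positions and then enumerating 2^n bit masks with per-mask re-assignment of every error bit.
import Mathlib
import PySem

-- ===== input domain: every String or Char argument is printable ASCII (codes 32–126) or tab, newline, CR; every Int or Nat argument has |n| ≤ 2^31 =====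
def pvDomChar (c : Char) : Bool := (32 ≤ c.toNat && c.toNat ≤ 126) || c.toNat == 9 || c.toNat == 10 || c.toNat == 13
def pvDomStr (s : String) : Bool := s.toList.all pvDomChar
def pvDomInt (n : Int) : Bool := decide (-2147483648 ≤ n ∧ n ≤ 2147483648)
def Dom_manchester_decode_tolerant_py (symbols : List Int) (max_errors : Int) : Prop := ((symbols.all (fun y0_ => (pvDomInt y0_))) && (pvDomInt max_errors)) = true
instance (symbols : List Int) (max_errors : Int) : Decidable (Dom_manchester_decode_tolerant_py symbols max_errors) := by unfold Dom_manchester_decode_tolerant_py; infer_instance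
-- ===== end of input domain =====

-- B grows every candidate stream in one fused pass over the pairs (doubling at
-- each invalid pair, early [] once the error budget is exceeded) instead of A's
-- two phases (collect bits/error positions, then enumerate 2^n bit masks).

-- ===== PORT A =====
-- Loop body of A's first pass (error positions are lengths, hence Nat; indices
-- symbols[i], symbols[i+1] are always in range because len(symbols) is even,
-- so the .getD 0 default is never used).
def pvPassStepA (symbols : List Int) (st : List Int × List Nat) (i : Int) : List Int × List Nat :=
  let a := (PySem.List.pyGet? symbols i).getD 0
  let b := (PySem.List.pyGet? symbols (i + 1)).getD 0
  if a = 1 ∧ b = 0 then (st.1 ++ [0], st.2)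
  else if a = 0 ∧ b = 1 then (st.1 ++ [1], st.2)
  else (st.1 ++ [(0 : Int)], st.2 ++ [st.1.length])

-- inner loop: 'for k, pos in enumerate(error_positions): trial[pos] = (mask >> k) & 1'
-- (k ≥ 0 always, so .toNat is exact; list assignment at an in-range index = List.set)
def pvTrial (bits : List Int) (errs : List Nat) (mask : Nat) : List Int :=
  (PySem.List.enumerate errs 0).foldl
    (fun trial kp => trial.set kp.2 (((mask >>> kp.1.toNat) &&& 1 : Nat) : Int)) bits

def manchester_decode_tolerant_py (symbols : List Int) (max_errors : Int) : List (List Int × Int) :=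
  if symbols.length % 2 ≠ 0 then []
  else
    let st := (PySem.List.pyRange 0 (symbols.length : Int) 2).foldl (pvPassStepA symbols) ([], [])
    let bits := st.1
    let error_positions := st.2
    if (error_positions.length : Int) > max_errors then []
    else
      let n_err := error_positions.length
      -- 'for mask in range(1 << n_err)': the range is over non-negative ints,
      -- ported exactly as List.range over Nat
      (List.range (1 <<< n_err)).foldl
        (fun candidates mask => candidates ++ [(pvTrial bits error_positions mask, (n_err : Int))])
        []

-- ===== PORT B =====
-- B's first loop: count invalid pairs
def pvCountStepB (symbols : List Int) (n : Nat) (i : Int) : Nat :=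
  let a := (PySem.List.pyGet? symbols i).getD 0
  let b := (PySem.List.pyGet? symbols (i + 1)).getD 0
  if (a = 1 ∧ b = 0) ∨ (a = 0 ∧ b = 1) then n else n + 1

-- B's second loop: grow every candidate ('c.append(b)' in place = map (· ++ [b])),
-- doubling the candidate list at an invalid pair
def pvBuildStepB (symbols : List Int) (cands : List (List Int)) (i : Int) : List (List Int) :=
  let a := (PySem.List.pyGet? symbols i).getD 0
  let b := (PySem.List.pyGet? symbols (i + 1)).getD 0
  if a = 1 ∧ b = 0 then cands.map (fun c => c ++ [0])
  else if a = 0 ∧ b = 1 then cands.map (fun c => c ++ [1])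
  else cands.map (fun c => c ++ [0]) ++ cands.map (fun c => c ++ [1])

def manchester_decode_tolerant_py_alt (symbols : List Int) (max_errors : Int) : List (List Int × Int) :=
  if symbols.length % 2 ≠ 0 then []
  else
    let n_err := (PySem.List.pyRange 0 (symbols.length : Int) 2).foldl (pvCountStepB symbols) 0
    if (n_err : Int) > max_errors then []
    else
      let candidates := (PySem.List.pyRange 0 (symbols.length : Int) 2).foldl (pvBuildStepB symbols) [[]]
      candidates.map (fun c => (c, (n_err : Int)))

-- ===== PRECONDITION & SPEC =====
def Spec_manchester_decode_tolerant_py (symbols : List Int) (max_errors : Int) (out : List (List Int × Int)) : Prop := out = manchester_decode_tolerant_py_alt symbols max_errors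
instance (symbols : List Int) (max_errors : Int) (out : List (List Int × Int)) : Decidable (Spec_manchester_decode_tolerant_py symbols max_errors out) := by unfold Spec_manchester_decode_tolerant_py; infer_instance

-- ===== CLAIM (what is proved, stated in full; the proofs are below) =====
def Claim_equal_manchester_decode_tolerant_py : Prop := ∀ (symbols : List Int) (max_errors : Int), Dom_manchester_decode_tolerant_py symbols max_errors → Spec_manchester_decode_tolerant_py symbols max_errors (manchester_decode_tolerant_py symbols max_errors)

-- ===== LEMMAS AND PROOFS =====

-- the value both enumerations compute: bits with errs[k] set to bit k of m
def pvAssign : List Int → List Nat → Nat → List Int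
  | bs, [], _ => bs
  | bs, p :: ps, m => pvAssign (bs.set p ((m % 2 : Nat) : Int)) ps (m / 2)

theorem pvTrial_gen (ps : List Nat) (bits : List Int) (mask : Nat) (s : Nat) :
    (PySem.List.enumerate ps (s : Int)).foldl
      (fun trial kp => trial.set kp.2 (((mask >>> kp.1.toNat) &&& 1 : Nat) : Int)) bits
    = pvAssign bits ps (mask >>> s) := by
  induction ps generalizing bits s with
  | nil => rfl
  | cons p ps ih =>
    rw [PySem.List.enumerate_cons, List.foldl_cons,
      show ((s : Int) + 1) = ((s + 1 : Nat) : Int) by omega, ih _ (s + 1)]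
    simp only [pvAssign, Int.toNat_natCast, Nat.and_one_is_mod, Nat.shiftRight_succ]

theorem pvTrial_eq_assign (errs : List Nat) (bits : List Int) (mask : Nat) :
    pvTrial bits errs mask = pvAssign bits errs mask := by
  have := pvTrial_gen errs bits mask 0
  simpa [pvTrial] using this

theorem pvAssign_length (ps : List Nat) (bs : List Int) (m : Nat) :
    (pvAssign bs ps m).length = bs.length := by
  induction ps generalizing bs m with
  | nil => rfl
  | cons p ps ih => simp [pvAssign, ih]

theorem pvAssign_append_right (ps : List Nat) (bs t : List Int) (m : Nat)
    (h : ∀ p ∈ ps, p < bs.length) :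
    pvAssign (bs ++ t) ps m = pvAssign bs ps m ++ t := by
  induction ps generalizing bs m with
  | nil => rfl
  | cons p ps ih =>
    simp only [pvAssign]
    rw [List.set_append_left _ _ (h p (by simp)),
      ih _ _ (fun q hq => by simpa using h q (by simp [hq]))]

theorem pvAssign_snoc (ps : List Nat) (bs : List Int) (p : Nat) (m : Nat) :
    pvAssign bs (ps ++ [p]) m
      = (pvAssign bs ps m).set p (((m / 2 ^ ps.length) % 2 : Nat) : Int) := by
  induction ps generalizing bs m with
  | nil => simp [pvAssign]
  | cons q ps ih =>
    simp only [List.cons_append, pvAssign, ih, List.length_cons]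
    congr 2
    rw [Nat.div_div_eq_div_mul, pow_succ, Nat.mul_comm]

theorem pvAssign_high (ps : List Nat) (bs : List Int) (m : Nat) :
    pvAssign bs ps (2 ^ ps.length + m) = pvAssign bs ps m := by
  induction ps generalizing bs m with
  | nil => rfl
  | cons p ps ih =>
    simp only [pvAssign, List.length_cons]
    rw [show 2 ^ (ps.length + 1) + m = 2 * 2 ^ ps.length + m by ring]
    have h1 : (2 * 2 ^ ps.length + m) % 2 = m % 2 := by omega
    have h2 : (2 * 2 ^ ps.length + m) / 2 = 2 ^ ps.length + m / 2 := by omega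
    rw [h1, h2, ih]

-- set at the last index of a snoc
theorem pv_set_last (xs : List Int) (x v : Int) : (xs ++ [x]).set xs.length v = xs ++ [v] := by
  rw [List.set_append_right _ _ (le_refl _)]
  simp

-- B's count equals the length of A's error-position list (same branch tests)
theorem pvCount_eq (symbols : List Int) (l : List Int) (stA : List Int × List Nat) (c : Nat)
    (h : c = stA.2.length) :
    l.foldl (pvCountStepB symbols) c = ((l.foldl (pvPassStepA symbols) stA).2).length := by
  induction l generalizing stA c with
  | nil => simpa using h
  | cons i l ih =>
    simp only [List.foldl_cons]
    apply ih
    subst h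
    unfold pvCountStepB pvPassStepA
    dsimp only
    by_cases h1 : (PySem.List.pyGet? symbols i).getD 0 = 1 ∧ (PySem.List.pyGet? symbols (i + 1)).getD 0 = 0 <;>
      by_cases h2 : (PySem.List.pyGet? symbols i).getD 0 = 0 ∧ (PySem.List.pyGet? symbols (i + 1)).getD 0 = 1 <;>
      simp [h1, h2]

-- A's error positions always lie inside its bits list
theorem pvPassStepA_bound (symbols : List Int) (i : Int) (stA : List Int × List Nat)
    (hpos : ∀ p ∈ stA.2, p < stA.1.length) :
    ∀ p ∈ (pvPassStepA symbols stA i).2, p < (pvPassStepA symbols stA i).1.length := by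
  obtain ⟨bits, errs⟩ := stA
  simp only at hpos
  unfold pvPassStepA
  dsimp only
  split_ifs
  · intro p hp
    simp only [List.length_append, List.length_singleton]
    exact Nat.lt_succ_of_lt (hpos p hp)
  · intro p hp
    simp only [List.length_append, List.length_singleton]
    exact Nat.lt_succ_of_lt (hpos p hp)
  · intro p hp
    simp only [List.mem_append, List.mem_singleton] at hp
    simp only [List.length_append, List.length_singleton]
    rcases hp with hp | hp
    · exact Nat.lt_succ_of_lt (hpos p hp)
    · omega

-- one build step turns the enumeration of A's state into the enumeration of A's next state
theorem pvBuildStep_eq (symbols : List Int) (i : Int) (stA : List Int × List Nat)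
    (hpos : ∀ p ∈ stA.2, p < stA.1.length) :
    pvBuildStepB symbols ((List.range (1 <<< stA.2.length)).map (pvAssign stA.1 stA.2)) i
      = (List.range (1 <<< (pvPassStepA symbols stA i).2.length)).map
          (pvAssign (pvPassStepA symbols stA i).1 (pvPassStepA symbols stA i).2) := by
  obtain ⟨bits, errs⟩ := stA
  simp only at hpos
  unfold pvBuildStepB pvPassStepA
  dsimp only
  split_ifs
  · dsimp only
    simp only [List.map_map]
    apply List.map_congr_left
    intro m _
    simp only [Function.comp_apply]
    exact (pvAssign_append_right errs bits [0] m hpos).symm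
  · dsimp only
    simp only [List.map_map]
    apply List.map_congr_left
    intro m _
    simp only [Function.comp_apply]
    exact (pvAssign_append_right errs bits [1] m hpos).symm
  · dsimp only
    -- the doubled candidate list is the enumeration over errs ++ [bits.length]
    have hG : ∀ m : Nat, pvAssign (bits ++ [(0:Int)]) (errs ++ [bits.length]) m
        = pvAssign bits errs m ++ [(((m / 2 ^ errs.length) % 2 : Nat) : Int)] := by
      intro m
      rw [pvAssign_snoc, pvAssign_append_right errs bits [0] m hpos,
        ← pvAssign_length errs bits m, pv_set_last]
    have hlen : (1:Nat) <<< (errs ++ [bits.length]).length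
        = 1 <<< errs.length + 1 <<< errs.length := by
      simp only [List.length_append, List.length_singleton, Nat.shiftLeft_eq, one_mul, pow_succ]
      ring
    rw [hlen, List.range_add, List.map_append, List.map_map]
    have e1 : List.map (pvAssign (bits ++ [(0:Int)]) (errs ++ [bits.length]))
        (List.range (1 <<< errs.length))
      = List.map ((fun c => c ++ [(0:Int)]) ∘ pvAssign bits errs) (List.range (1 <<< errs.length)) := by
      apply List.map_congr_left
      intro m hm
      rw [List.mem_range] at hm
      simp only [Function.comp_apply]
      rw [hG m]
      have h0 : m / 2 ^ errs.length = 0 :=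
        Nat.div_eq_of_lt (by simpa [Nat.shiftLeft_eq] using hm)
      simp [h0]
    have e2 : List.map (pvAssign (bits ++ [(0:Int)]) (errs ++ [bits.length]))
        (List.map (fun x => 1 <<< errs.length + x) (List.range (1 <<< errs.length)))
      = List.map (fun c => c ++ [(1:Int)]) (List.map (pvAssign bits errs) (List.range (1 <<< errs.length))) := by
      rw [List.map_map, List.map_map]
      apply List.map_congr_left
      intro m hm
      rw [List.mem_range] at hm
      simp only [Function.comp_apply]
      rw [hG (1 <<< errs.length + m),
        show (1:Nat) <<< errs.length + m = 2 ^ errs.length + m by simp [Nat.shiftLeft_eq],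
        pvAssign_high]
      have hmlt : m < 2 ^ errs.length := by simpa [Nat.shiftLeft_eq] using hm
      have h1' : (2 ^ errs.length + m) / 2 ^ errs.length = 1 := by
        rw [Nat.add_div_left _ (Nat.two_pow_pos _), Nat.div_eq_of_lt hmlt]
      simp [h1']
    rw [e1, e2]

theorem pvBuild_eq (symbols : List Int) (l : List Int) (stA : List Int × List Nat)
    (hpos : ∀ p ∈ stA.2, p < stA.1.length) :
    l.foldl (pvBuildStepB symbols) ((List.range (1 <<< stA.2.length)).map (pvAssign stA.1 stA.2))
      = (List.range (1 <<< (l.foldl (pvPassStepA symbols) stA).2.length)).map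
          (pvAssign (l.foldl (pvPassStepA symbols) stA).1 (l.foldl (pvPassStepA symbols) stA).2) := by
  induction l generalizing stA with
  | nil => rfl
  | cons i l ih =>
    simp only [List.foldl_cons]
    rw [pvBuildStep_eq symbols i stA hpos]
    exact ih _ (pvPassStepA_bound symbols i stA hpos)

-- ===== VERDICT (by name: the statement is the Claim_ definition above) =====
theorem manchester_decode_tolerant_py_spec : Claim_equal_manchester_decode_tolerant_py := by
  intro symbols max_errors _
  unfold Spec_manchester_decode_tolerant_py manchester_decode_tolerant_py manchester_decode_tolerant_py_alt
  by_cases hpar : symbols.length % 2 ≠ 0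
  · simp [hpar]
  · simp only [hpar, if_false]
    set stA := (PySem.List.pyRange 0 (symbols.length : Int) 2).foldl (pvPassStepA symbols) ([], []) with hstA
    have hcnt : (PySem.List.pyRange 0 (symbols.length : Int) 2).foldl (pvCountStepB symbols) 0
        = stA.2.length :=
      pvCount_eq symbols _ (([], []) : List Int × List Nat) 0 rfl
    rw [hcnt]
    by_cases hg : (stA.2.length : Int) > max_errors
    · simp [hg]
    · simp only [hg, if_false]
      have hbuild := pvBuild_eq symbols (PySem.List.pyRange 0 (symbols.length : Int) 2)
        (([], []) : List Int × List Nat) (by simp)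
      have hinit : ((List.range (1 <<< (([] : List Nat)).length)).map
          (pvAssign ([] : List Int) ([] : List Nat))) = [[]] := rfl
      rw [hinit] at hbuild
      rw [hbuild, ← hstA]
      rw [PySem.List.foldl_append_singleton_eq_map, List.nil_append, List.map_map]
      apply List.map_congr_left
      intro m _
      simp [pvTrial_eq_assign]
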